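-- pv_equiv track=rewrite | github.com/aledlie/ast-grep-mcp | scripts/migration_common.py | remove_line_ranges
-- ===== SOURCE A (Python) =====
-- from typing import List, Sequence, Tuple
--
-- def _normalize_ranges(ranges: Sequence[Tuple[int, int]]) -> List[Tuple[int, int]]:
--     """Sort and merge line ranges (start inclusive, end exclusive)."""
--     if not ranges:
--         return []
--
--     valid = sorted((start, end) for start, end in ranges if start < end)
--     if not valid:
--         return []
--
--     merged: List[Tuple[int, int]] = [valid[0]]
--     for start, end in valid[1:]:
--         prev_start, prev_end = merged[-1]
--         if start <= prev_end:
--             merged[-1] = (prev_start, max(prev_end, end))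
--         else:
--             merged.append((start, end))
--     return merged
--
-- def remove_line_ranges(lines: Sequence[str], ranges: Sequence[Tuple[int, int]]) -> List[str]:
--     """Return a new list with line ranges removed.
--
--     Args:
--         lines: Original lines.
--         ranges: Zero-based ranges with end-exclusive semantics.
--     """
--     merged = _normalize_ranges(ranges)
--     if not merged:
--         return list(lines)
--
--     result: List[str] = []
--     range_idx = 0
--     current_start, current_end = merged[range_idx]
--
--     for line_idx, line in enumerate(lines):
--         while range_idx < len(merged) and line_idx >= current_end:
--             range_idx += 1
--             if range_idx < len(merged):
--                 current_start, current_end = merged[range_idx]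
--
--         in_range = range_idx < len(merged) and current_start <= line_idx < current_end
--         if not in_range:
--             result.append(line)
--
--     return result
-- ===== SOURCE B (Python) =====
-- def remove_line_ranges(lines, ranges):
--     """Return a new list with line ranges removed (zero-based, end-exclusive)."""
--     n = len(lines)
--     delta = [0] * (n + 1)
--     for start, end in ranges:
--         s = max(start, 0)
--         e = min(end, n)
--         if s < e:
--             delta[s] += 1
--             delta[e] -= 1
--     result = []
--     depth = 0
--     for i, line in enumerate(lines):
--         depth += delta[i]
--         if depth == 0:
--             result.append(line)
--     return result
-- ===== Notes on version B (the rewrite author's own statement) =====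
-- stated objective: alternative
-- what changed: Replaces A's sort+merge of ranges followed by a two-pointer walk over the lines with a clipped difference array over line indices and a single depth-counting scan that keeps lines at depth 0.
import Mathlib
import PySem

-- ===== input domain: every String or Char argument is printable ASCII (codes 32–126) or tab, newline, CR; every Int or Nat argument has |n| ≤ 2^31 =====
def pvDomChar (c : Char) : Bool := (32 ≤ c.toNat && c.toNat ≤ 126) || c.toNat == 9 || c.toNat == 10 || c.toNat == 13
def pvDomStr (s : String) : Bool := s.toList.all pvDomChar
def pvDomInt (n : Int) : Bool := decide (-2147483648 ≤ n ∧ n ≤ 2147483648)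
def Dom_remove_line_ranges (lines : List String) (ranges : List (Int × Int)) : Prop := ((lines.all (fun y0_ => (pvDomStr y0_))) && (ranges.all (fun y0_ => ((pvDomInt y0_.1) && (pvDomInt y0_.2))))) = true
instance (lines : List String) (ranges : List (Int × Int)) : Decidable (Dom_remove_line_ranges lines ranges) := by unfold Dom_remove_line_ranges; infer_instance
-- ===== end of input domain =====

-- B replaces A's sort+merge+pointer-walk with a clipped difference array over line
-- indices and a depth-counting scan (objective: alternative; same return value everywhere).


-- ===== PORT A =====
-- Python's merge loop mutates merged[-1]; here the (still unfinished) last element is the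
-- recursion's accumulator `cur`, the same state walked over the same sorted list.
def mergeRanges : (Int × Int) → List (Int × Int) → List (Int × Int)
  | cur, [] => [cur]
  | (ps, pe), (s, e) :: rest =>
    if s ≤ pe then mergeRanges (ps, max pe e) rest
    else (ps, pe) :: mergeRanges (s, e) rest

-- _normalize_ranges: sort the valid (start < end) ranges lexicographically, then merge.
def normalizeRanges (ranges : List (Int × Int)) : List (Int × Int) :=
  if ranges = [] then []
  else
    match PySem.List.sorted2 (ranges.filter (fun p => decide (p.1 < p.2))) Prod.fst Prod.snd with
    | [] => []
    | v0 :: vrest => mergeRanges v0 vrest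

-- the inner `while` loop of A
def aAdvance (merged : List (Int × Int)) (i : Int) (r : Nat) (cs ce : Int) : Nat × Int × Int :=
  if h : r < merged.length ∧ ce ≤ i then
    if h2 : r + 1 < merged.length then
      aAdvance merged i (r + 1) (merged[r+1]).1 (merged[r+1]).2
    else
      aAdvance merged i (r + 1) cs ce
  else (r, cs, ce)
termination_by merged.length + 1 - r

-- the `for line_idx, line in enumerate(lines)` loop of A
def aGo (merged : List (Int × Int)) : List String → Int → Nat → Int → Int → List String
  | [], _, _, _, _ => []
  | l :: rest, i, r, cs, ce =>
    let st := aAdvance merged i r cs ce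
    let inRange := decide (st.1 < merged.length) && decide (st.2.1 ≤ i) && decide (i < st.2.2)
    (if inRange then [] else [l]) ++ aGo merged rest (i + 1) st.1 st.2.1 st.2.2

def remove_line_ranges (lines : List String) (ranges : List (Int × Int)) : List String :=
  match normalizeRanges ranges with
  | [] => lines
  | (cs, ce) :: rest => aGo ((cs, ce) :: rest) lines 0 0 cs ce

-- ===== PORT B =====
-- body of B's first loop: clip the range to [0, n] and mark it in the difference array
def bStep (n : Nat) (d : List Int) (q : Int × Int) : List Int :=
  let s := max q.1 0
  let e := min q.2 (n : Int)
  if s < e then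
    let d1 := d.set s.toNat (d[s.toNat]! + 1)
    d1.set e.toNat (d1[e.toNat]! - 1)
  else d

-- B's second loop: running depth of the difference array; keep lines at depth 0
def bScan (delta : List Int) : List String → Nat → Int → List String
  | [], _, _ => []
  | l :: rest, i, depth =>
    let depth' := depth + delta[i]!
    (if depth' == 0 then [l] else []) ++ bScan delta rest (i + 1) depth'

def remove_line_ranges_alt (lines : List String) (ranges : List (Int × Int)) : List String :=
  let delta := ranges.foldl (bStep lines.length) (List.replicate (lines.length + 1) 0)
  bScan delta lines 0 0

-- ===== PRECONDITION & SPEC =====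
def Spec_remove_line_ranges (lines : List String) (ranges : List (Int × Int)) (out : List String) : Prop := out = remove_line_ranges_alt lines ranges
instance (lines : List String) (ranges : List (Int × Int)) (out : List String) : Decidable (Spec_remove_line_ranges lines ranges out) := by unfold Spec_remove_line_ranges; infer_instance

-- ===== CLAIM (what is proved, stated in full; the proofs are below) =====
def Claim_equal_remove_line_ranges : Prop := ∀ (lines : List String) (ranges : List (Int × Int)), Dom_remove_line_ranges lines ranges → Spec_remove_line_ranges lines ranges (remove_line_ranges lines ranges)

-- ===== LEMMAS AND PROOFS =====

-- keep-predicate filter over lines with a running index: common shape of both sides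
def filterIdx (k : Int → Bool) : List String → Int → List String
  | [], _ => []
  | l :: rest, i => (if k i then [l] else []) ++ filterIdx k rest (i + 1)

lemma filterIdx_congr (k k' : Int → Bool) (h : ∀ i, k i = k' i) :
    ∀ (lines : List String) (i : Int), filterIdx k lines i = filterIdx k' lines i := by
  intro lines
  induction lines with
  | nil => intro i; rfl
  | cons l rest ih => intro i; simp [filterIdx, h, ih]

lemma filterIdx_all_true (k : Int → Bool) (h : ∀ i, k i = true) :
    ∀ (lines : List String) (i : Int), filterIdx k lines i = lines := by
  intro lines
  induction lines with
  | nil => intro i; rfl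
  | cons l rest ih => intro i; simp [filterIdx, h, ih]

-- number of ranges whose clipped form covers the half-open prefix boundary k (i.e. s < k ≤ e)
def countCov (n : Nat) (ranges : List (Int × Int)) (k : Nat) : Int :=
  ((ranges.filter (fun q => decide (max q.1 0 < min q.2 (n : Int)) &&
      decide (max q.1 0 < (k : Int)) && decide ((k : Int) ≤ min q.2 (n : Int)))).length : Int)

lemma sum_set_int (L : List Int) (m : Nat) (a : Int) (h : m < L.length) :
    (L.set m a).sum = L.sum - L[m] + a := by
  have h1 := List.sum_set L m a
  have h2 := List.sum_set L m (L[m])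
  rw [List.set_getElem_self] at h2
  simp only [if_pos h] at h1 h2
  omega

lemma sum_take_set_add (d : List Int) (a k : Nat) (c : Int) (ha : a < d.length) :
    ((d.set a (d[a]! + c)).take k).sum = (d.take k).sum + (if a < k then c else 0) := by
  rw [List.take_set]
  by_cases hk : a < k
  · have hlen : a < (d.take k).length := by simp [List.length_take]; omega
    rw [sum_set_int _ _ _ hlen, getElem!_pos d a ha, List.getElem_take]
    simp only [if_pos hk]
    ring
  · rw [List.set_eq_of_length_le (by simp [List.length_take]; omega)]
    simp [hk]

lemma bStep_length (n : Nat) (d : List Int) (q : Int × Int) :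
    (bStep n d q).length = d.length := by
  unfold bStep
  by_cases h : max q.1 0 < min q.2 (n : Int) <;> simp [h]

lemma delta_fold (n : Nat) : ∀ (rs : List (Int × Int)) (d : List Int), d.length = n + 1 →
    ∀ k : Nat, ((rs.foldl (bStep n) d).take k).sum = (d.take k).sum + countCov n rs k := by
  intro rs
  induction rs with
  | nil => intro d _ k; simp [countCov]
  | cons q rs ih =>
    intro d hd k
    rw [List.foldl_cons, ih (bStep n d q) (by rw [bStep_length, hd])]
    have hstep : ((bStep n d q).take k).sum = (d.take k).sum +
        (if max q.1 0 < min q.2 (n : Int) ∧ max q.1 0 < (k : Int) ∧ (k : Int) ≤ min q.2 (n : Int)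
          then 1 else 0) := by
      unfold bStep
      by_cases hse : max q.1 0 < min q.2 (n : Int)
      · simp only [if_pos hse]
        have hs0 : (0 : Int) ≤ max q.1 0 := by omega
        have hsn : (max q.1 0).toNat < d.length := by rw [hd]; omega
        have hen : (min q.2 (n : Int)).toNat < (d.set (max q.1 0).toNat (d[(max q.1 0).toNat]! + 1)).length := by
          rw [List.length_set, hd]; omega
        rw [show ((d.set (max q.1 0).toNat (d[(max q.1 0).toNat]! + 1))[(min q.2 (n : Int)).toNat]! - 1)
            = ((d.set (max q.1 0).toNat (d[(max q.1 0).toNat]! + 1))[(min q.2 (n : Int)).toNat]! + (-1)) by ring]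
        rw [sum_take_set_add _ _ _ _ hen, sum_take_set_add _ _ _ _ hsn]
        have h1 : (max q.1 0).toNat < k ↔ max q.1 0 < (k : Int) := by omega
        have h2 : (min q.2 (n : Int)).toNat < k ↔ min q.2 (n : Int) < (k : Int) := by omega
        by_cases hk1 : (max q.1 0).toNat < k <;> by_cases hk2 : (min q.2 (n : Int)).toNat < k <;>
          simp only [hk1, hk2, if_pos, if_false] <;> split_ifs <;> omega
      · simp only [if_neg hse]
        split_ifs with h
        · exact absurd h.1 hse
        · ring
    rw [hstep]
    have hcc : countCov n (q :: rs) k =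
        (if max q.1 0 < min q.2 (n : Int) ∧ max q.1 0 < (k : Int) ∧ (k : Int) ≤ min q.2 (n : Int)
          then 1 else 0) + countCov n rs k := by
      unfold countCov
      rw [List.filter_cons]
      by_cases h : max q.1 0 < min q.2 (n : Int) ∧ max q.1 0 < (k : Int) ∧ (k : Int) ≤ min q.2 (n : Int)
      · have hb : (decide (max q.1 0 < min q.2 (n : Int)) && decide (max q.1 0 < (k : Int)) &&
            decide ((k : Int) ≤ min q.2 (n : Int))) = true := by
          simp [h.1, h.2.1, h.2.2]
        simp only [hb, if_pos h, if_true, List.length_cons]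
        push_cast
        ring
      · have hb : (decide (max q.1 0 < min q.2 (n : Int)) && decide (max q.1 0 < (k : Int)) &&
            decide ((k : Int) ≤ min q.2 (n : Int))) = false := by
          simp only [not_and] at *
          simp only [Bool.and_eq_false_iff, decide_eq_false_iff_not]
          tauto
        simp only [hb, if_neg h, if_false, Bool.false_eq_true]
        omega
    rw [hcc]
    ring

lemma bScan_eq (n : Nat) (ranges : List (Int × Int)) (delta : List Int)
    (hlen : delta.length = n + 1)
    (hdelta : ∀ k : Nat, (delta.take k).sum = countCov n ranges k) :
    ∀ (lines' : List String) (i : Nat) (depth : Int), i + lines'.length ≤ n →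
      depth = (delta.take i).sum →
      bScan delta lines' i depth =
        filterIdx (fun j => !(ranges.any (fun q => decide (q.1 ≤ j) && decide (j < q.2)))) lines' (i : Int) := by
  intro lines'
  induction lines' with
  | nil => intro i depth _ _; rfl
  | cons l rest ih =>
    intro i depth hle hdep
    have hi : i < n := by simp [List.length_cons] at hle; omega
    have hin : i < delta.length := by omega
    have hd' : depth + delta[i]! = (delta.take (i + 1)).sum := by
      rw [getElem!_pos delta i hin, hdep, List.take_add_one, List.sum_append,
        List.getElem?_eq_getElem hin]
      simp
    have hkeep : ((depth + delta[i]!) == 0) =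
        !(ranges.any (fun q => decide (q.1 ≤ (i : Int)) && decide ((i : Int) < q.2))) := by
      rw [Bool.eq_iff_iff, beq_iff_eq, hd', hdelta (i + 1)]
      simp only [Bool.not_eq_eq_eq_not, Bool.not_true]
      rw [show ((ranges.any fun q => decide (q.1 ≤ (i : Int)) && decide ((i : Int) < q.2)) = false)
          ↔ ∀ q ∈ ranges, ¬(q.1 ≤ (i : Int) ∧ (i : Int) < q.2) by
        rw [List.any_eq_false]; simp]
      unfold countCov
      rw [show (((ranges.filter (fun q => decide (max q.1 0 < min q.2 (n : Int)) &&
            decide (max q.1 0 < ((i + 1 : Nat) : Int)) && decide (((i + 1 : Nat) : Int) ≤ min q.2 (n : Int)))).length : Int) = 0)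
          ↔ (ranges.filter (fun q => decide (max q.1 0 < min q.2 (n : Int)) &&
            decide (max q.1 0 < ((i + 1 : Nat) : Int)) && decide (((i + 1 : Nat) : Int) ≤ min q.2 (n : Int)))) = [] by
        rw [Int.natCast_eq_zero, List.length_eq_zero_iff]]
      rw [List.filter_eq_nil_iff]
      constructor
      · intro h q hq hcov
        have := h q hq
        simp only [Bool.and_eq_true, decide_eq_true_eq, not_and] at this
        omega
      · intro h q hq
        have := h q hq
        simp only [Bool.and_eq_true, decide_eq_true_eq, not_and] at this ⊢
        omega
    show (if ((depth + delta[i]!) == 0) then [l] else []) ++ bScan delta rest (i + 1) (depth + delta[i]!) = _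
    rw [hkeep, ih (i + 1) (depth + delta[i]!) (by simp [List.length_cons] at hle ⊢; omega) hd']
    show _ = (if !(ranges.any fun q => decide (q.1 ≤ (i : Int)) && decide ((i : Int) < q.2)) then [l] else []) ++
      filterIdx _ rest ((i : Int) + 1)
    rw [show (((i + 1 : Nat) : Int)) = (i : Int) + 1 by push_cast; ring]

lemma foldl_bStep_length (n : Nat) (rs : List (Int × Int)) :
    ∀ d : List Int, (rs.foldl (bStep n) d).length = d.length := by
  induction rs with
  | nil => intro d; rfl
  | cons q rs ih => intro d; rw [List.foldl_cons, ih, bStep_length]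

lemma alt_eq_filterIdx (ranges : List (Int × Int)) (lines : List String) :
    remove_line_ranges_alt lines ranges =
      filterIdx (fun j => !(ranges.any (fun q => decide (q.1 ≤ j) && decide (j < q.2)))) lines 0 := by
  unfold remove_line_ranges_alt
  have hlen : (ranges.foldl (bStep lines.length) (List.replicate (lines.length + 1) 0)).length
      = lines.length + 1 := by
    rw [foldl_bStep_length, List.length_replicate]
  have hdelta : ∀ k : Nat,
      ((ranges.foldl (bStep lines.length) (List.replicate (lines.length + 1) 0)).take k).sum
        = countCov lines.length ranges k := by
    intro k
    rw [delta_fold lines.length ranges _ (List.length_replicate) k, List.take_replicate,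
      List.sum_replicate]
    simp
  exact bScan_eq lines.length ranges _ hlen hdelta lines 0 0 (by omega) (by simp)

-- lexicographic strict order used by Python's tuple sort
def lexLt (a b : Int × Int) : Prop := a.1 < b.1 ∨ (a.1 = b.1 ∧ a.2 < b.2)

lemma pairwise_insertBy_lex (x : Int × Int) (ys : List (Int × Int))
    (h : ys.Pairwise (fun a b => ¬ lexLt b a)) :
    (PySem.List.insertBy
        (fun a b => decide (a.1 < b.1) || !decide (b.1 < a.1) && decide (a.2 < b.2)) x ys).Pairwise
      (fun a b => ¬ lexLt b a) := by
  induction ys with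
  | nil => simp [PySem.List.insertBy]
  | cons y ys ih =>
    rcases List.pairwise_cons.1 h with ⟨hy, hys⟩
    by_cases hb : (decide (x.1 < y.1) || !decide (y.1 < x.1) && decide (x.2 < y.2)) = true
    · simp only [PySem.List.insertBy, hb, if_pos]
      refine List.pairwise_cons.2 ⟨?_, h⟩
      intro z hz
      rw [List.mem_cons] at hz
      rcases hz with rfl | hz
      · simp only [Bool.or_eq_true, Bool.and_eq_true, decide_eq_true_eq, Bool.not_eq_true',
          decide_eq_false_iff_not] at hb
        unfold lexLt; omega
      · have := hy z hz
        simp only [Bool.or_eq_true, Bool.and_eq_true, decide_eq_true_eq, Bool.not_eq_true',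
          decide_eq_false_iff_not] at hb
        unfold lexLt at this ⊢; omega
    · simp only [PySem.List.insertBy, hb, if_neg, Bool.not_eq_true]
      refine List.pairwise_cons.2 ⟨?_, ih hys⟩
      intro z hz
      rw [PySem.List.mem_insertBy] at hz
      rcases hz with rfl | hz
      · simp only [Bool.or_eq_true, Bool.and_eq_true, decide_eq_true_eq, Bool.not_eq_true',
          decide_eq_false_iff_not] at hb
        unfold lexLt; omega
      · exact hy z hz

lemma sorted2_pairwise_lex (xs : List (Int × Int)) :
    (PySem.List.sorted2 xs Prod.fst Prod.snd false).Pairwise (fun a b => ¬ lexLt b a) := by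
  unfold PySem.List.sorted2
  suffices h : ∀ acc : List (Int × Int), acc.Pairwise (fun a b => ¬ lexLt b a) →
      (List.foldl (fun acc x => PySem.List.insertBy
        (fun a b => decide (a.1 < b.1) || !decide (b.1 < a.1) && decide (a.2 < b.2)) x acc) acc xs).Pairwise
        (fun a b => ¬ lexLt b a) by
    exact h [] (by simp)
  induction xs with
  | nil => intro acc h; simpa using h
  | cons x xs ih =>
    intro acc h
    exact ih _ (pairwise_insertBy_lex x acc h)

-- the heart: mergeRanges of a fst-sorted valid list is a disjoint sorted chain covering the same indices
lemma merge_main : ∀ (rest : List (Int × Int)) (cur : Int × Int),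
    cur.1 < cur.2 → (∀ p ∈ rest, p.1 < p.2) → (∀ p ∈ rest, cur.1 ≤ p.1) →
    rest.Pairwise (fun a b => a.1 ≤ b.1) →
    (∃ e' t, mergeRanges cur rest = (cur.1, e') :: t ∧ cur.2 ≤ e') ∧
    (mergeRanges cur rest).Pairwise (fun a b => a.2 < b.1) ∧
    (∀ p ∈ mergeRanges cur rest, p.1 < p.2) ∧
    (∀ i : Int, (∃ p ∈ mergeRanges cur rest, p.1 ≤ i ∧ i < p.2) ↔
      ((cur.1 ≤ i ∧ i < cur.2) ∨ ∃ p ∈ rest, p.1 ≤ i ∧ i < p.2)) := by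
  intro rest
  induction rest with
  | nil =>
    intro cur hv _ _ _
    refine ⟨⟨cur.2, [], by simp [mergeRanges], le_refl _⟩, by simp [mergeRanges], ?_, ?_⟩
    · intro p hp; simp [mergeRanges] at hp; subst hp; exact hv
    · intro i; simp [mergeRanges]
  | cons q rest ih =>
    rintro ⟨ps, pe⟩ hv hall hfst hpw
    obtain ⟨s, e⟩ := q
    rcases List.pairwise_cons.1 hpw with ⟨hq, hpw'⟩
    have hse : s < e := hall (s, e) (by simp)
    have hps : ps ≤ s := hfst (s, e) (by simp)
    by_cases hle : s ≤ pe
    · -- merge into cur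
      have hrec := ih (ps, max pe e) (by simp at hv ⊢; omega)
        (fun p hp => hall p (by simp [hp]))
        (fun p hp => le_trans hps (hq p hp))
        hpw'
      simp only [mergeRanges, if_pos hle]
      refine ⟨?_, hrec.2.1, hrec.2.2.1, ?_⟩
      · obtain ⟨e', t, he, hle'⟩ := hrec.1
        exact ⟨e', t, he, by simp at hle' hv ⊢; omega⟩
      · intro i
        rw [(hrec.2.2.2) i]
        simp only [List.mem_cons]
        constructor
        · rintro (h | ⟨p, hp, h⟩)
          · simp at h hv
            by_cases hi : i < pe
            · exact Or.inl ⟨h.1, hi⟩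
            · exact Or.inr ⟨(s, e), Or.inl rfl, by simp; omega⟩
          · exact Or.inr ⟨p, Or.inr hp, h⟩
        · rintro (h | ⟨p, (rfl | hp), h⟩)
          · exact Or.inl ⟨h.1, by simp; omega⟩
          · exact Or.inl ⟨by simp at h ⊢; omega, by simp at h ⊢; omega⟩
          · exact Or.inr ⟨p, hp, h⟩
    · -- close cur, start a new range
      have hrec := ih (s, e) hse
        (fun p hp => hall p (by simp [hp]))
        (fun p hp => hq p hp)
        hpw'
      simp only [mergeRanges, if_neg hle]
      obtain ⟨e', t, he, hle'⟩ := hrec.1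
      refine ⟨⟨pe, mergeRanges (s, e) rest, rfl, le_refl _⟩, ?_, ?_, ?_⟩
      · refine List.pairwise_cons.2 ⟨?_, hrec.2.1⟩
        intro z hz
        rw [he] at hz hrec
        rw [List.mem_cons] at hz
        rcases hz with rfl | hz
        · simp; omega
        · have hpw2 := List.pairwise_cons.1 hrec.2.1
          have h1 := hpw2.1 z hz
          simp at h1 hle' ⊢
          omega
      · intro p hp
        rw [List.mem_cons] at hp
        rcases hp with rfl | hp
        · exact hv
        · exact hrec.2.2.1 p hp
      · intro i
        simp only [List.mem_cons]
        constructor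
        · rintro ⟨p, (rfl | hp), h⟩
          · exact Or.inl h
          · rcases (hrec.2.2.2 i).1 ⟨p, hp, h⟩ with h' | ⟨p', hp', h'⟩
            · exact Or.inr ⟨(s, e), Or.inl rfl, h'⟩
            · exact Or.inr ⟨p', Or.inr hp', h'⟩
        · rintro (h | ⟨p, (rfl | hp), h⟩)
          · exact ⟨(ps, pe), Or.inl rfl, h⟩
          · obtain ⟨p', hp', h'⟩ := (hrec.2.2.2 i).2 (Or.inl h)
            exact ⟨p', Or.inr hp', h'⟩
          · obtain ⟨p', hp', h'⟩ := (hrec.2.2.2 i).2 (Or.inr ⟨p, hp, h⟩)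
            exact ⟨p', Or.inr hp', h'⟩

-- invariant carried by A's loop state
def LoopInv (merged : List (Int × Int)) (i : Int) (r : Nat) (cs ce : Int) : Prop :=
  r ≤ merged.length ∧
  (∀ h : r < merged.length, (cs, ce) = merged[r]) ∧
  (∀ j, (hj : j < merged.length) → j < r → (merged[j]).2 ≤ i)

lemma loopInv_mono (merged : List (Int × Int)) (i i' : Int) (r : Nat) (cs ce : Int)
    (hii : i ≤ i') (h : LoopInv merged i r cs ce) : LoopInv merged i' r cs ce :=
  ⟨h.1, h.2.1, fun j hj hjr => le_trans (h.2.2 j hj hjr) hii⟩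

lemma aAdvance_spec (merged : List (Int × Int)) (i : Int) (r : Nat) (cs ce : Int) :
    LoopInv merged i r cs ce →
      LoopInv merged i (aAdvance merged i r cs ce).1 (aAdvance merged i r cs ce).2.1
        (aAdvance merged i r cs ce).2.2 ∧
      ((aAdvance merged i r cs ce).1 < merged.length →
        i < (aAdvance merged i r cs ce).2.2) := by
  fun_induction aAdvance merged i r cs ce with
  | case1 r cs ce h h2 ih =>
    intro hInv
    apply ih
    refine ⟨Nat.le_of_lt h2, fun _ => rfl, ?_⟩
    intro j hj hjr
    rcases Nat.lt_succ_iff_lt_or_eq.1 hjr with hjr' | rfl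
    · exact hInv.2.2 j hj hjr'
    · have := hInv.2.1 h.1
      have h22 : (merged[j]).2 = ce := by rw [← this]
      omega
  | case2 r cs ce h h2 ih =>
    intro hInv
    apply ih
    refine ⟨by omega, fun hlt => absurd hlt h2, ?_⟩
    intro j hj hjr
    rcases Nat.lt_succ_iff_lt_or_eq.1 hjr with hjr' | rfl
    · exact hInv.2.2 j hj hjr'
    · have := hInv.2.1 h.1
      have h22 : (merged[j]).2 = ce := by rw [← this]
      omega
  | case3 r cs ce h =>
    intro hInv
    refine ⟨hInv, ?_⟩
    intro hlt
    have hlt' : r < merged.length := hlt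
    have := hInv.2.1 hlt'
    have h22 : (merged[r]).2 = ce := by rw [← this]
    rw [Decidable.not_and_iff_or_not] at h
    rcases h with h | h
    · exact absurd hlt' h
    · show i < ce
      omega

lemma aGo_eq_filterIdx (merged : List (Int × Int))
    (hpw : merged.Pairwise (fun a b => a.2 < b.1)) :
    ∀ (lines : List String) (i : Int) (r : Nat) (cs ce : Int), LoopInv merged i r cs ce →
      aGo merged lines i r cs ce =
        filterIdx (fun j => !(merged.any (fun q => decide (q.1 ≤ j) && decide (j < q.2)))) lines i := by
  intro lines
  induction lines with
  | nil => intro i r cs ce _; rfl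
  | cons l rest ih =>
    intro i r cs ce hInv
    obtain ⟨hInv0, hlt0⟩ := aAdvance_spec merged i r cs ce hInv
    rcases e : aAdvance merged i r cs ce with ⟨r', cs', ce'⟩
    rw [e] at hInv0 hlt0
    have hInv' : LoopInv merged i r' cs' ce' := hInv0
    have hlt : r' < merged.length → i < ce' := hlt0
    have hmem : (∃ p ∈ merged, p.1 ≤ i ∧ i < p.2) ↔
        (r' < merged.length ∧ cs' ≤ i ∧ i < ce') := by
      constructor
      · rintro ⟨p, hp, hcov⟩
        rw [List.mem_iff_getElem] at hp
        obtain ⟨j, hj, rfl⟩ := hp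
        by_cases hr : r' < merged.length
        · have heq := hInv'.2.1 hr
          have hice := hlt hr
          rcases Nat.lt_trichotomy j r' with hlt' | heqj | hgt
          · have := hInv'.2.2 j hj hlt'
            omega
          · refine ⟨hr, ?_, hice⟩
            simp only [heqj] at hcov
            rw [← heq] at hcov
            exact hcov.1
          · have hchain := (List.pairwise_iff_getElem.1 hpw) r' j hr hj hgt
            have hx : ce' < (merged[j]).1 := by rw [← heq] at hchain; exact hchain
            omega
        · have hr' : r' = merged.length := by
            have := hInv'.1
            omega
          have := hInv'.2.2 j hj (by omega)
          omega
      · rintro ⟨hr, h1, h2⟩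
        have heq := hInv'.2.1 hr
        refine ⟨merged[r'], List.getElem_mem hr, ?_, ?_⟩ <;> rw [← heq]
        · exact h1
        · exact h2
    have hany : (merged.any (fun q => decide (q.1 ≤ i) && decide (i < q.2))) =
        (decide (r' < merged.length) && decide (cs' ≤ i) && decide (i < ce')) := by
      rw [Bool.eq_iff_iff]
      simp only [List.any_eq_true, Bool.and_eq_true, decide_eq_true_eq]
      rw [show (∃ x ∈ merged, x.1 ≤ i ∧ i < x.2) ↔ _ from hmem]
      tauto
    have hInv2 : LoopInv merged (i + 1) r' cs' ce' :=
      loopInv_mono merged i (i + 1) _ _ _ (by omega) hInv'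
    simp only [aGo, e]
    rw [ih (i + 1) r' cs' ce' hInv2]
    show _ = (if !(merged.any (fun q => decide (q.1 ≤ i) && decide (i < q.2))) then [l] else []) ++ _
    rw [hany]
    cases hb : (decide (r' < merged.length) && decide (cs' ≤ i) && decide (i < ce')) <;> simp

lemma mergeRanges_ne_nil : ∀ (rest : List (Int × Int)) (cur : Int × Int), mergeRanges cur rest ≠ [] := by
  intro rest
  induction rest with
  | nil => intro cur; simp [mergeRanges]
  | cons q rest ih =>
    rintro ⟨ps, pe⟩
    obtain ⟨s, e⟩ := q
    by_cases hle : s ≤ pe <;> simp [mergeRanges, hle, ih]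

-- ===== VERDICT (by name: the statement is the Claim_ definition above) =====
theorem remove_line_ranges_spec : Claim_equal_remove_line_ranges := by
  intro lines ranges _
  show remove_line_ranges lines ranges = remove_line_ranges_alt lines ranges
  have halt : remove_line_ranges_alt lines ranges
      = filterIdx (fun j => !(ranges.any fun q => decide (q.1 ≤ j) && decide (j < q.2))) lines 0 :=
    alt_eq_filterIdx ranges lines
  by_cases hn : ranges = []
  · subst hn
    have hA : remove_line_ranges lines [] = lines := rfl
    rw [hA, halt]
    exact (filterIdx_all_true _ (fun j => by simp) lines 0).symm
  · have hperm := PySem.List.sorted2_perm (ranges.filter (fun p => decide (p.1 < p.2))) Prod.fst Prod.snd false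
    have hcov_filter : ∀ (p : Int × Int) (j : Int), p ∈ ranges → p.1 ≤ j → j < p.2 →
        p ∈ PySem.List.sorted2 (ranges.filter (fun p => decide (p.1 < p.2))) Prod.fst Prod.snd false := by
      intro p j hp h1 h2
      exact (hperm.mem_iff).2 (List.mem_filter.2 ⟨hp, by simp; omega⟩)
    rcases hv : PySem.List.sorted2 (ranges.filter (fun p => decide (p.1 < p.2))) Prod.fst Prod.snd false with _ | ⟨v0, vrest⟩
    · -- no valid ranges: A returns lines, B keeps everything
      have hnorm : normalizeRanges ranges = [] := by
        simp only [normalizeRanges, if_neg hn, hv]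
      have hA : remove_line_ranges lines ranges = lines := by
        unfold remove_line_ranges
        rw [hnorm]
      rw [hA, halt]
      refine (filterIdx_all_true _ ?_ lines 0).symm
      intro j
      simp only [Bool.not_eq_eq_eq_not, Bool.not_true, List.any_eq_false]
      rintro ⟨a, b⟩ hab
      simp only [Bool.and_eq_true, decide_eq_true_eq, not_and]
      intro h1 h2
      have := hcov_filter (a, b) j hab h1 (by omega)
      rw [hv] at this
      simp at this
    · -- at least one valid range
      have hpwlex := sorted2_pairwise_lex (ranges.filter (fun p => decide (p.1 < p.2)))
      rw [hv] at hpwlex hperm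
      have hpwfst : (v0 :: vrest).Pairwise (fun a b : Int × Int => a.1 ≤ b.1) :=
        hpwlex.imp (by intro a b h; unfold lexLt at h; omega)
      have hvalid : ∀ p ∈ v0 :: vrest, p.1 < p.2 := by
        intro p hp
        have := List.mem_filter.1 (hperm.mem_iff.1 hp)
        simpa using this.2
      have hmm := merge_main vrest v0 (hvalid v0 (by simp))
        (fun p hp => hvalid p (by simp [hp]))
        (fun p hp => (List.pairwise_cons.1 hpwfst).1 p hp)
        (List.pairwise_cons.1 hpwfst).2
      rcases hm : mergeRanges v0 vrest with _ | ⟨⟨cs, ce⟩, mrest⟩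
      · exact absurd hm (mergeRanges_ne_nil vrest v0)
      · have hnorm : normalizeRanges ranges = (cs, ce) :: mrest := by
          simp only [normalizeRanges, if_neg hn, hv, hm]
        have hA : remove_line_ranges lines ranges = aGo ((cs, ce) :: mrest) lines 0 0 cs ce := by
          unfold remove_line_ranges
          rw [hnorm]
        rw [hA, halt,
          aGo_eq_filterIdx ((cs, ce) :: mrest) (hm ▸ hmm.2.1) lines 0 0 cs ce
            ⟨by simp, fun _ => by simp, by omega⟩]
        apply filterIdx_congr
        intro j
        have hcov := hmm.2.2.2 j
        rw [hm] at hcov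
        congr 1
        rw [Bool.eq_iff_iff]
        simp only [List.any_eq_true, Bool.and_eq_true, decide_eq_true_eq]
        constructor
        · rintro ⟨p, hp, h1, h2⟩
          rcases hcov.1 ⟨p, hp, h1, h2⟩ with h | ⟨p', hp', h'⟩
          · have : v0 ∈ ranges := (List.mem_filter.1 (hperm.mem_iff.1 (by simp))).1
            exact ⟨v0, this, h.1, h.2⟩
          · have : p' ∈ ranges := (List.mem_filter.1 (hperm.mem_iff.1 (by simp [hp']))).1
            exact ⟨p', this, h'.1, h'.2⟩
        · rintro ⟨p, hp, h1, h2⟩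
          have hpin := hcov_filter p j hp h1 h2
          rw [hv] at hpin
          rw [List.mem_cons] at hpin
          rcases hpin with rfl | hpin
          · exact hcov.2 (Or.inl ⟨h1, h2⟩)
          · exact hcov.2 (Or.inr ⟨p, hpin, h1, h2⟩)
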